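-- pv_equiv track=rewrite | github.com/khjkhj0329/hyojung-coding-test-study | programmes/모의고사.py | solution
-- ===== SOURCE A (Python) =====
-- def solution(answers):
--
--     stu1 = [1, 2, 3, 4, 5] * 2000
--     stu2 = [2, 1, 2, 3, 2, 4, 2, 5] * 1250
--     stu3 = [3, 3, 1, 1, 2, 2, 4, 4, 5, 5] * 1000
--
--     cut_stu1 = 0
--     cut_stu2 = 0
--     cut_stu3 = 0
--
--     for i in range(0, len(answers)):
--         if stu1[i] == answers[i]:
--             cut_stu1 += 1
--         if stu2[i] == answers[i]:
--             cut_stu2 += 1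
--         if stu3[i] == answers[i]:
--             cut_stu3 += 1
--
--     rank = [0, cut_stu1, cut_stu2, cut_stu3]
--     cut_max = max(rank) #제일 많이 맞춘 갯수를 찾기
--     answer = []
--     for i in range(len(rank)):
--         if rank[i] == cut_max:
--             answer.append(i)
--     return answer
-- ===== SOURCE B (Python) =====
-- def solution(answers):
--     # Histogram algorithm: one pass builds a frequency table keyed by
--     # (position mod 40, answer) -- 40 = lcm of the pattern periods 5, 8, 10 --
--     # then each student's score is read off the table without rescanning answers.
--     freq = {}
--     for i, a in enumerate(answers):
--         key = (i % 40, a)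
--         freq[key] = freq.get(key, 0) + 1
--     patterns = [[1, 2, 3, 4, 5],
--                 [2, 1, 2, 3, 2, 4, 2, 5],
--                 [3, 3, 1, 1, 2, 2, 4, 4, 5, 5]]
--     rank = [0] + [sum(c for (r, a), c in freq.items() if a == p[r % len(p)])
--                   for p in patterns]
--     m = max(rank)
--     return [i for i, v in enumerate(rank) if v == m]
-- ===== Notes on version B (the rewrite author's own statement) =====
-- stated objective: alternative
-- what changed: Replaces A's three pre-materialised 10000-entry answer sheets and single interleaved comparison loop by a frequency table keyed by (position mod 40, answer) -- 40 = lcm of the pattern periods 5,8,10 -- built in one pass; each score is then read off the histogram without rescanning answers.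
import Mathlib
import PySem

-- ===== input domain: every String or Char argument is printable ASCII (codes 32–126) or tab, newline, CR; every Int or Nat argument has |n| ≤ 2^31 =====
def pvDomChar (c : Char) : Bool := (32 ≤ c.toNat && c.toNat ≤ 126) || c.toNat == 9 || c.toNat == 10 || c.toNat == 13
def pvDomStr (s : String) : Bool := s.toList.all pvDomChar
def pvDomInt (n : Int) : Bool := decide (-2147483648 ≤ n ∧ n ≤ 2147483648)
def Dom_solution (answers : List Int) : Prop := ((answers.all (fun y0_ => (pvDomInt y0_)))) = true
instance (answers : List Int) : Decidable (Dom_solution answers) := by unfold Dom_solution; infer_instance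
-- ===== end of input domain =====

-- B replaces A's three pre-materialised 10000-entry answer sheets and interleaved comparison
-- loop by a frequency table keyed by (position mod 40, answer) from which the scores are read.


-- ===== PORT A =====
def solution (answers : List Int) : List Int :=
  let stu1 := (List.replicate 2000 ([1, 2, 3, 4, 5] : List Int)).flatten
  let stu2 := (List.replicate 1250 ([2, 1, 2, 3, 2, 4, 2, 5] : List Int)).flatten
  let stu3 := (List.replicate 1000 ([3, 3, 1, 1, 2, 2, 4, 4, 5, 5] : List Int)).flatten
  let cs := (PySem.List.pyRange 0 answers.length 1).foldl
    (fun (c : Int × Int × Int) i =>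
      let c1 := if PySem.List.pyGetD stu1 i 0 == PySem.List.pyGetD answers i 0 then c.1 + 1 else c.1
      let c2 := if PySem.List.pyGetD stu2 i 0 == PySem.List.pyGetD answers i 0 then c.2.1 + 1 else c.2.1
      let c3 := if PySem.List.pyGetD stu3 i 0 == PySem.List.pyGetD answers i 0 then c.2.2 + 1 else c.2.2
      (c1, c2, c3)) (0, 0, 0)
  let rank : List Int := [0, cs.1, cs.2.1, cs.2.2]
  let cutMax := (PySem.List.max? rank (fun y => y)).getD 0
  (PySem.List.pyRange 0 rank.length 1).foldl
    (fun acc i => if PySem.List.pyGetD rank i 0 == cutMax then acc ++ [i] else acc) []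

-- ===== PORT B =====
def solution_alt (answers : List Int) : List Int :=
  let freq := (PySem.List.enumerate answers).foldl
      (fun (d : PySem.Dict (Int × Int) Int) ia =>
        let k : Int × Int := (PySem.Int.mod ia.1 40, ia.2)
        d.insert k (d.getD k 0 + 1))
      PySem.Dict.empty
  let patterns : List (List Int) :=
    [[1, 2, 3, 4, 5], [2, 1, 2, 3, 2, 4, 2, 5], [3, 3, 1, 1, 2, 2, 4, 4, 5, 5]]
  let rank : List Int := 0 :: patterns.map (fun p =>
      (freq.items.map (fun kc =>
        if kc.1.2 == PySem.List.pyGetD p (PySem.Int.mod kc.1.1 (p.length : Int)) 0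
        then kc.2 else 0)).sum)
  let m := (PySem.List.max? rank (fun y => y)).getD 0
  (PySem.List.enumerate rank).filterMap (fun iv => if iv.2 == m then some iv.1 else none)

-- ===== PRECONDITION & SPEC =====
-- A indexes its 10000-entry sheets by every position of answers, so it raises IndexError
-- on lists longer than 10000; Pre_ excludes exactly those.
def Pre_solution (answers : List Int) : Prop := answers.length ≤ 10000
instance (answers : List Int) : Decidable (Pre_solution answers) := by unfold Pre_solution; infer_instance
def pvWitness_solution : List Int := [1, 3, 2, 4, 2]
def Spec_solution (answers : List Int) (out : List Int) : Prop := out = solution_alt answers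
instance (answers : List Int) (out : List Int) : Decidable (Spec_solution answers out) := by unfold Spec_solution; infer_instance

-- ===== CLAIM (what is proved, stated in full; the proofs are below) =====
def Claim_equal_solution : Prop := ∀ (answers : List Int), Dom_solution answers → Pre_solution answers → Spec_solution answers (solution answers)

-- ===== LEMMAS AND PROOFS =====

-- direct cyclic-index score: the common value both sides are reduced to
def dscore (p : List Int) (answers : List Int) : Int :=
  ((PySem.List.enumerate answers).map
    (fun ia => if ia.2 == PySem.List.pyGetD p (PySem.Int.mod ia.1 (p.length : Int)) 0 then (1 : Int) else 0)).sum

lemma sheet_getD (p : List Int) (m k : Nat) (hp : p ≠ []) (hk : k < m * p.length) :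
    ((List.replicate m p).flatten).getD k 0 = p.getD (k % p.length) 0 := by
  induction m generalizing k with
  | zero => omega
  | succ n ih =>
      rw [List.replicate_succ, List.flatten_cons]
      by_cases h : k < p.length
      · rw [List.getD_append _ _ _ _ h, Nat.mod_eq_of_lt h]
      · have hlen : 0 < p.length := List.length_pos_of_ne_nil hp
        have e : (n + 1) * p.length = n * p.length + p.length := by ring
        rw [List.getD_append_right _ _ _ _ (by omega), ih _ (by omega)]
        conv_rhs => rw [Nat.mod_eq_sub_mod (by omega)]

lemma enum_app {α : Type} (xs : List α) (x : α) (s : Int) :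
    PySem.List.enumerate (xs ++ [x]) s = PySem.List.enumerate xs s ++ [(s + xs.length, x)] := by
  induction xs generalizing s with
  | nil => simp [PySem.List.enumerate_nil, PySem.List.enumerate_cons]
  | cons a t ih =>
      simp [PySem.List.enumerate_cons, ih]
      ring_nf

lemma score_append (p xs : List Int) (x : Int) :
    dscore p (xs ++ [x]) =
      dscore p xs + (if x == p.getD (xs.length % p.length) 0 then 1 else 0) := by
  unfold dscore
  rw [enum_app]
  simp only [List.map_append, List.sum_append, List.map_cons, List.map_nil, List.sum_cons,
    List.sum_nil, add_zero, zero_add]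
  have h : PySem.Int.mod ((xs.length : Int)) (p.length : Int) = ((xs.length % p.length : Nat) : Int) :=
    PySem.Int.mod_natCast _ _
  rw [h, PySem.List.pyGetD_natCast]

lemma loop_eq (p1 p2 p3 : List Int) (m1 m2 m3 : Nat)
    (hp1 : p1 ≠ []) (hp2 : p2 ≠ []) (hp3 : p3 ≠ [])
    (ans : List Int) (b1 : ans.length ≤ m1 * p1.length)
    (b2 : ans.length ≤ m2 * p2.length) (b3 : ans.length ≤ m3 * p3.length) :
    (PySem.List.pyRange 0 (ans.length : Int) 1).foldl
      (fun (c : Int × Int × Int) i =>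
        (if PySem.List.pyGetD ((List.replicate m1 p1).flatten) i 0 == PySem.List.pyGetD ans i 0 then c.1 + 1 else c.1,
         if PySem.List.pyGetD ((List.replicate m2 p2).flatten) i 0 == PySem.List.pyGetD ans i 0 then c.2.1 + 1 else c.2.1,
         if PySem.List.pyGetD ((List.replicate m3 p3).flatten) i 0 == PySem.List.pyGetD ans i 0 then c.2.2 + 1 else c.2.2))
      (0, 0, 0)
    = (dscore p1 ans, dscore p2 ans, dscore p3 ans) := by
  induction ans using List.reverseRecOn with
  | nil => simp [PySem.List.pyRange_one_eq_nil, dscore, PySem.List.enumerate_nil]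
  | append_singleton xs x ih =>
      have hlen : ((xs ++ [x]).length : Int) = (xs.length : Int) + 1 := by
        simp
      rw [hlen, PySem.List.pyRange_one_succ_right (by positivity), List.foldl_append,
        List.foldl_cons, List.foldl_nil]
      have hxs1 : xs.length ≤ m1 * p1.length := by simp at b1; omega
      have hxs2 : xs.length ≤ m2 * p2.length := by simp at b2; omega
      have hxs3 : xs.length ≤ m3 * p3.length := by simp at b3; omega
      have hcongr : (PySem.List.pyRange 0 (xs.length : Int) 1).foldl
          (fun (c : Int × Int × Int) i =>
            (if PySem.List.pyGetD ((List.replicate m1 p1).flatten) i 0 == PySem.List.pyGetD (xs ++ [x]) i 0 then c.1 + 1 else c.1,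
             if PySem.List.pyGetD ((List.replicate m2 p2).flatten) i 0 == PySem.List.pyGetD (xs ++ [x]) i 0 then c.2.1 + 1 else c.2.1,
             if PySem.List.pyGetD ((List.replicate m3 p3).flatten) i 0 == PySem.List.pyGetD (xs ++ [x]) i 0 then c.2.2 + 1 else c.2.2))
          (0, 0, 0)
          = (PySem.List.pyRange 0 (xs.length : Int) 1).foldl
          (fun (c : Int × Int × Int) i =>
            (if PySem.List.pyGetD ((List.replicate m1 p1).flatten) i 0 == PySem.List.pyGetD xs i 0 then c.1 + 1 else c.1,
             if PySem.List.pyGetD ((List.replicate m2 p2).flatten) i 0 == PySem.List.pyGetD xs i 0 then c.2.1 + 1 else c.2.1,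
             if PySem.List.pyGetD ((List.replicate m3 p3).flatten) i 0 == PySem.List.pyGetD xs i 0 then c.2.2 + 1 else c.2.2))
          (0, 0, 0) := by
        apply PySem.List.foldl_congr_mem
        intro c i hi
        rw [PySem.List.mem_pyRange_one] at hi
        lift i to Nat using hi.1 with k
        have hk : k < xs.length := by exact_mod_cast hi.2
        simp only [PySem.List.pyGetD_natCast]
        rw [List.getD_append _ _ _ _ hk]
      rw [hcongr, ih hxs1 hxs2 hxs3]
      rw [score_append p1 xs x, score_append p2 xs x, score_append p3 xs x]
      have hget : PySem.List.pyGetD (xs ++ [x]) (xs.length : Int) 0 = x := by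
        rw [PySem.List.pyGetD_natCast]
        simp [List.getD_eq_getElem?_getD]
      have hs : ∀ (p : List Int) (m : Nat), p ≠ [] → xs.length < m * p.length →
          PySem.List.pyGetD ((List.replicate m p).flatten) (xs.length : Int) 0
            = p.getD (xs.length % p.length) 0 := by
        intro p m hp hb
        rw [PySem.List.pyGetD_natCast, sheet_getD p m _ hp hb]
      rw [hget, hs p1 m1 hp1 (by simp at b1; omega), hs p2 m2 hp2 (by simp at b2; omega),
        hs p3 m3 hp3 (by simp at b3; omega)]
      simp only [beq_iff_eq]
      have t : ∀ (s a b : Int), (if a = b then s + 1 else s) = s + (if b = a then 1 else 0) := by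
        intro s a b
        by_cases h : a = b
        · simp [h]
        · rw [if_neg h, if_neg (fun hh => h hh.symm), add_zero]
      simp only [t]

-- Nodup keys covering x: summing the indicator over the keys picks out x exactly once
lemma sum_indicator_keys (keys : List (Int × Int)) (P : Int × Int → Bool) (x : Int × Int)
    (hnd : keys.Nodup) (hx : x ∈ keys) :
    (keys.map (fun k => if P k && (x == k) then (1 : Int) else 0)).sum
      = if P x then 1 else 0 := by
  induction keys with
  | nil => cases hx
  | cons a t ih =>
      rw [List.map_cons, List.sum_cons]
      rw [List.nodup_cons] at hnd
      rcases List.mem_cons.1 hx with h | h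
      · subst h
        have hz : (t.map (fun k => if P k && (x == k) then (1 : Int) else 0)).sum = 0 := by
          apply List.sum_eq_zero
          intro y hy
          rcases List.mem_map.1 hy with ⟨k, hk, rfl⟩
          have hne : (x == k) = false := by
            rw [beq_eq_false_iff_ne]
            intro hh; exact hnd.1 (hh ▸ hk)
          simp [hne]
        rw [hz, add_zero]
        by_cases hP : P x = true <;> simp [hP]
      · have hax : (x == a) = false := by
          rw [beq_eq_false_iff_ne]
          intro hh; exact hnd.1 (hh ▸ h)
        rw [ih hnd.2 h]
        simp [hax]

lemma sum_count_keys (ks keys : List (Int × Int)) (P : Int × Int → Bool)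
    (hnd : keys.Nodup) (hcov : ∀ x ∈ ks, x ∈ keys) :
    (keys.map (fun k => if P k then (ks.count k : Int) else 0)).sum = (ks.countP P : Int) := by
  induction ks with
  | nil => simp
  | cons x t ih =>
      have hx : x ∈ keys := hcov x (List.mem_cons_self ..)
      have hcov' : ∀ y ∈ t, y ∈ keys := fun y hy => hcov y (List.mem_cons_of_mem _ hy)
      have hsplit : ∀ k, (if P k then ((x :: t).count k : Int) else 0)
          = (if P k then (t.count k : Int) else 0) + (if P k && (x == k) then 1 else 0) := by
        intro k
        rw [List.count_cons]
        by_cases h : P k = true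
        · by_cases he : (k == x) = true
          · have he' : (x == k) = true := by
              rw [beq_iff_eq] at he ⊢; exact he.symm
            simp only [h, he', Bool.true_and, if_true]
            push_cast
            ring
          · have he' : (x == k) = false := by
              rw [beq_eq_false_iff_ne]
              rw [beq_iff_eq] at he
              exact fun hh => he hh.symm
            have he2 : (k == x) = false := eq_false_of_ne_true he
            simp [h, he']
        · have h' : P k = false := eq_false_of_ne_true h
          simp [h']
      simp only [hsplit]
      rw [PySem.List.sum_map_add_int]
      rw [ih hcov', sum_indicator_keys keys P x hnd hx]
      rw [List.countP_cons]
      by_cases h : P x = true <;> simp [h]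

lemma enum_fst_nat (xs : List Int) (s : Nat) :
    ∀ ia ∈ PySem.List.enumerate xs (s : Int), ∃ k : Nat, ia.1 = (k : Int) := by
  induction xs generalizing s with
  | nil => intro ia h; simp [PySem.List.enumerate_nil] at h
  | cons a t ih =>
      intro ia h
      rw [PySem.List.enumerate_cons] at h
      rcases List.mem_cons.1 h with h | h
      · exact ⟨s, by simp [h]⟩
      · have : ((s : Int) + 1) = ((s + 1 : Nat) : Int) := by push_cast; ring
        rw [this] at h
        exact ih (s + 1) ia h

-- B's histogram score equals the direct cyclic-index score
lemma bscore_eq (p ans : List Int) (_hp : p ≠ []) (hdvd : p.length ∣ 40) :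
    ((((PySem.List.enumerate ans).foldl
        (fun (d : PySem.Dict (Int × Int) Int) ia =>
          let k : Int × Int := (PySem.Int.mod ia.1 40, ia.2)
          d.insert k (d.getD k 0 + 1))
        PySem.Dict.empty).items).map (fun kc =>
        if kc.1.2 == PySem.List.pyGetD p (PySem.Int.mod kc.1.1 (p.length : Int)) 0
        then kc.2 else 0)).sum = dscore p ans := by
  set key : Int × Int → Int × Int := fun ia => (PySem.Int.mod ia.1 40, ia.2) with hkey
  set ks : List (Int × Int) := (PySem.List.enumerate ans).map key with hks
  set P : Int × Int → Bool :=
    fun k => k.2 == PySem.List.pyGetD p (PySem.Int.mod k.1 (p.length : Int)) 0 with hP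
  have hfold : (PySem.List.enumerate ans).foldl
      (fun (d : PySem.Dict (Int × Int) Int) ia =>
        let k : Int × Int := (PySem.Int.mod ia.1 40, ia.2)
        d.insert k (d.getD k 0 + 1))
      PySem.Dict.empty = PySem.Dict.counter ks := by
    rw [hks, ← PySem.Dict.foldl_insert_getD_add_one_eq_counter, List.foldl_map]
  rw [hfold, PySem.Dict.items_counter]
  rw [List.map_map]
  have hmap : ((PySem.Set.ofList ks).map
      ((fun kc => if P kc.1 then kc.2 else (0 : Int)) ∘ fun k => (k, (ks.count k : Int))))
      = (PySem.Set.ofList ks).map (fun k => if P k then (ks.count k : Int) else 0) := by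
    simp [Function.comp]
  have h1 : ((PySem.Set.ofList ks).map (fun k => if P k then (ks.count k : Int) else 0)).sum
      = (ks.countP P : Int) :=
    sum_count_keys ks (PySem.Set.ofList ks) P (PySem.Set.nodup_ofList ks)
      (fun x hx => (PySem.Set.mem_ofList ..).2 hx)
  show (List.map ((fun kc => if P kc.1 then kc.2 else (0 : Int)) ∘
      fun k => (k, (ks.count k : Int))) (PySem.Set.ofList ks)).sum = dscore p ans
  rw [hmap, h1]
  -- now relate countP over ks to dscore
  rw [hks, List.countP_map]
  unfold dscore
  rw [PySem.List.sum_map_ite_one_zero]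
  congr 1
  apply List.countP_congr
  intro ia hia
  rcases enum_fst_nat ans 0 ia (by simpa using hia) with ⟨k, hk⟩
  simp only [hP, hkey, Function.comp]
  have h40 : PySem.Int.mod ia.1 40 = ((k % 40 : Nat) : Int) := by
    rw [hk]; exact_mod_cast PySem.Int.mod_natCast k 40
  have hmm : PySem.Int.mod ((k % 40 : Nat) : Int) (p.length : Int)
      = ((k % p.length : Nat) : Int) := by
    have := PySem.Int.mod_natCast (k % 40) p.length
    rw [this, Nat.mod_mod_of_dvd k hdvd]
  have hfin : PySem.Int.mod ia.1 (p.length : Int) = ((k % p.length : Nat) : Int) := by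
    rw [hk]; exact_mod_cast PySem.Int.mod_natCast k p.length
  rw [h40, hmm, hfin]

lemma final4 (r1 r2 r3 m : Int) :
    (PySem.List.pyRange 0 (([0, r1, r2, r3] : List Int).length : Int) 1).foldl
      (fun acc i => if PySem.List.pyGetD ([0, r1, r2, r3] : List Int) i 0 == m then acc ++ [i] else acc)
      ([] : List Int)
    = (PySem.List.enumerate ([0, r1, r2, r3] : List Int)).filterMap
        (fun iv => if iv.2 == m then some iv.1 else none) := by
  have h4 : (([0, r1, r2, r3] : List Int).length : Int) = 4 := by simp
  rw [h4, show PySem.List.pyRange 0 4 1 = [0, 1, 2, 3] from by decide]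
  simp only [List.foldl_cons, List.foldl_nil, PySem.List.enumerate_cons, PySem.List.enumerate_nil,
    List.filterMap_cons, List.filterMap_nil, PySem.List.pyGetD_ofNat']
  norm_num
  split_ifs <;> rfl

-- ===== VERDICT (by name: the statement is the Claim_ definition above) =====
theorem solution_spec : Claim_equal_solution := by
  intro ans _ h
  unfold Spec_solution
  have hloop := loop_eq [1,2,3,4,5] [2,1,2,3,2,4,2,5] [3,3,1,1,2,2,4,4,5,5] 2000 1250 1000
    (by decide) (by decide) (by decide) ans (by simpa using h) (by simpa using h) (by simpa using h)
  unfold solution solution_alt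
  simp only [List.map_cons, List.map_nil]
  rw [hloop]
  simp only [bscore_eq [1,2,3,4,5] ans (by decide) (by decide),
      bscore_eq [2,1,2,3,2,4,2,5] ans (by decide) (by decide),
      bscore_eq [3,3,1,1,2,2,4,4,5,5] ans (by decide) (by decide)]
  exact final4 _ _ _ _
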